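-- pv_equiv track=rewrite | github.com/c-s-westphal/terc_inference_experiments | condition1_validation/subset_enumeration.py | count_subset_pairs
-- ===== SOURCE A (Python) =====
-- def count_subset_pairs(n_vars: int) -> int:
--     """
--     Count total number of disjoint subset pairs with different sizes.
--
--     Args:
--         n_vars: Number of variables
--
--     Returns:
--         Total count of pairs
--     """
--     count = 0
--     for size1 in range(1, n_vars):
--         for size2 in range(1, n_vars - size1 + 1):
--             if size1 == size2:
--                 continue
--             # Number of ways to choose size1 from n_vars
--             from math import comb
--             n_s1 = comb(n_vars, size1)
--             # Number of ways to choose size2 from remaining (n_vars - size1)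
--             n_s2 = comb(n_vars - size1, size2)
--             count += n_s1 * n_s2
--     return count
-- ===== SOURCE B (Python) =====
-- from math import comb
--
--
-- def count_subset_pairs(n_vars: int) -> int:
--     # Closed form: ordered pairs of disjoint nonempty subsets number 3^n - 2*2^n + 1;
--     # subtract the equal-size pairs (one O(n) diagonal sum).
--     if n_vars <= 1:
--         return 0
--     total = 3 ** n_vars - 2 * 2 ** n_vars + 1
--     diag = sum(comb(n_vars, k) * comb(n_vars - k, k) for k in range(1, n_vars // 2 + 1))
--     return total - diag
-- ===== Notes on version B (the rewrite author's own statement) =====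
-- stated objective: faster
-- what changed: Replaces the O(n^2) double loop of binomial products by the closed form 3^n - 2*2^n + 1 for all ordered disjoint nonempty subset pairs, minus a single O(n) diagonal sum over equal-size pairs.
import Mathlib
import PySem

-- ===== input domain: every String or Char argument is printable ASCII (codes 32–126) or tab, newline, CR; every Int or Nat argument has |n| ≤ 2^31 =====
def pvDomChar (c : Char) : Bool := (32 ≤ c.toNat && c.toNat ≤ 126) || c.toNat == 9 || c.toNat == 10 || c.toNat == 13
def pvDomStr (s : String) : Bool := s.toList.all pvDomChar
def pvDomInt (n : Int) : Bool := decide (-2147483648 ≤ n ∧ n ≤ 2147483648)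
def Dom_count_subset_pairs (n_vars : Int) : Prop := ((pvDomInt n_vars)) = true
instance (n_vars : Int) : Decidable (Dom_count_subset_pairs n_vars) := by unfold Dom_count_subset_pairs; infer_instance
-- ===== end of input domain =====

-- B replaces A's O(n^2) double loop of binomial products by the closed form
-- 3^n - 2*2^n + 1 minus one O(n) diagonal sum (measurably faster).


-- ===== PORT A =====
-- math.comb; exact for nonnegative arguments, which is all this file's call sites
def pyComb (n k : Int) : Int := ((n.toNat).choose k.toNat : Int)

def count_subset_pairs (n_vars : Int) : Int :=
  (PySem.List.pyRange 1 n_vars 1).foldl (fun count size1 =>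
    (PySem.List.pyRange 1 (n_vars - size1 + 1) 1).foldl (fun count size2 =>
      if size1 == size2 then count
      else count + pyComb n_vars size1 * pyComb (n_vars - size1) size2) count) 0

-- ===== PORT B =====
def count_subset_pairs_alt (n_vars : Int) : Int :=
  if n_vars ≤ 1 then 0
  else
    -- 3 ** n_vars, 2 ** n_vars with n_vars ≥ 2: exact via toNat
    let total : Int := 3 ^ n_vars.toNat - 2 * 2 ^ n_vars.toNat + 1
    let diag : Int := ((PySem.List.pyRange 1 (PySem.Int.floordiv n_vars 2 + 1) 1).map
      (fun k => pyComb n_vars k * pyComb (n_vars - k) k)).sum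
    total - diag

-- ===== PRECONDITION & SPEC =====
def Spec_count_subset_pairs (n_vars : Int) (out : Int) : Prop := out = count_subset_pairs_alt n_vars
instance (n_vars : Int) (out : Int) : Decidable (Spec_count_subset_pairs n_vars out) := by unfold Spec_count_subset_pairs; infer_instance

-- ===== CLAIM (what is proved, stated in full; the proofs are below) =====
def Claim_equal_count_subset_pairs : Prop := ∀ (n_vars : Int), Dom_count_subset_pairs n_vars → Spec_count_subset_pairs n_vars (count_subset_pairs n_vars)

-- ===== LEMMAS AND PROOFS =====

-- sum of f over pyRange(1, b+1) is the shifted Finset.range sum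
lemma sum_map_pyRange_one (f : Int → Int) (b : Nat) :
    ((PySem.List.pyRange 1 ((b : Int) + 1) 1).map f).sum
      = ∑ i ∈ Finset.range b, f ((i : Int) + 1) := by
  induction b with
  | zero =>
      norm_num [PySem.List.pyRange_one_eq_nil (le_refl (1 : Int))]
  | succ b ih =>
      rw [show (((b+1 : Nat)) : Int) + 1 = ((b : Int) + 1) + 1 by push_cast; ring,
        PySem.List.pyRange_one_succ_right (by omega : (1:Int) ≤ (b : Int) + 1)]
      simp [ih, Finset.sum_range_succ]

-- the inner Python loop as a sum
lemma inner_loop_eq (n_vars size1 count : Int) :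
    (PySem.List.pyRange 1 (n_vars - size1 + 1) 1).foldl (fun count size2 =>
        if size1 == size2 then count
        else count + pyComb n_vars size1 * pyComb (n_vars - size1) size2) count
      = count + ((PySem.List.pyRange 1 (n_vars - size1 + 1) 1).map (fun size2 =>
          if size1 = size2 then 0
          else pyComb n_vars size1 * pyComb (n_vars - size1) size2)).sum := by
  have hf : (fun (count size2 : Int) =>
        if size1 == size2 then count
        else count + pyComb n_vars size1 * pyComb (n_vars - size1) size2)
      = fun (count size2 : Int) => count + (if size1 = size2 then 0
          else pyComb n_vars size1 * pyComb (n_vars - size1) size2) := by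
    funext c s
    by_cases h : size1 = s <;> simp [h]
  rw [hf, PySem.List.foldl_add]

lemma portA_eq_sum (n : Nat) (hn : 2 ≤ n) :
    count_subset_pairs (n : Int)
      = ∑ i ∈ Finset.range (n - 1), ∑ j ∈ Finset.range (n - (i+1)),
          (if i = j then 0
           else (n.choose (i+1) : Int) * ((n - (i+1)).choose (j+1) : Int)) := by
  simp only [count_subset_pairs]
  have hfun : (fun (count size1 : Int) =>
      (PySem.List.pyRange 1 ((n:Int) - size1 + 1) 1).foldl (fun count size2 =>
        if size1 == size2 then count
        else count + pyComb (n:Int) size1 * pyComb ((n:Int) - size1) size2) count)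
    = fun (count size1 : Int) => count +
        ((PySem.List.pyRange 1 ((n:Int) - size1 + 1) 1).map (fun size2 =>
          if size1 = size2 then 0
          else pyComb (n:Int) size1 * pyComb ((n:Int) - size1) size2)).sum := by
    funext c s
    exact inner_loop_eq _ _ _
  rw [hfun, PySem.List.foldl_add,
    show ((n : Nat) : Int) = ((n - 1 : Nat) : Int) + 1 by omega,
    sum_map_pyRange_one]
  simp only [zero_add]
  apply Finset.sum_congr rfl
  intro i hi
  have hi' : i < n - 1 := Finset.mem_range.mp hi
  rw [show ((↑(n-1) : Int) + 1) - ((↑i : Int) + 1) + 1 = ((n - (i+1) : Nat) : Int) + 1 by omega,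
    sum_map_pyRange_one]
  apply Finset.sum_congr rfl
  intro j hj
  have hj' : j < n - (i+1) := Finset.mem_range.mp hj
  by_cases hij : i = j
  · subst hij
    simp
  · rw [if_neg (by omega : ¬ ((↑i : Int) + 1 = (↑j : Int) + 1)), if_neg hij]
    simp only [pyComb]
    rw [show ((↑(n-1) : Int) + 1).toNat = n by omega,
      show ((↑i : Int) + 1).toNat = i + 1 by omega,
      show (((↑(n-1) : Int) + 1) - ((↑i : Int) + 1)).toNat = n - (i+1) by omega,
      show ((↑j : Int) + 1).toNat = j + 1 by omega]

lemma portB_eq_sum (n : Nat) (hn : 2 ≤ n) :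
    count_subset_pairs_alt (n : Int)
      = (3 ^ n - 2 * 2 ^ n + 1 : Int)
        - ∑ k ∈ Finset.range (n / 2),
            (n.choose (k+1) : Int) * ((n - (k+1)).choose (k+1) : Int) := by
  simp only [count_subset_pairs_alt]
  rw [if_neg (by omega : ¬ ((n : Int) ≤ 1))]
  have h2 : PySem.Int.floordiv (n : Int) 2 = ((n / 2 : Nat) : Int) := by
    exact_mod_cast PySem.Int.floordiv_natCast n 2
  rw [h2, sum_map_pyRange_one]
  simp only [Int.toNat_natCast]
  congr 1
  apply Finset.sum_congr rfl
  intro k hk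
  have hk' : k < n / 2 := Finset.mem_range.mp hk
  simp only [pyComb]
  rw [show ((n : Nat) : Int).toNat = n by omega,
    show ((↑k : Int) + 1).toNat = k + 1 by omega,
    show ((n : Int) - ((↑k : Int) + 1)).toNat = n - (k+1) by omega]

-- ∑_{j=1..m} C(m,j) = 2^m - 1, shifted to range m, in Int
lemma choose_shift_sum (m : Nat) :
    ∑ j ∈ Finset.range m, (m.choose (j+1) : Int) = 2 ^ m - 1 := by
  have h := Nat.sum_range_choose m
  rw [Finset.sum_range_succ'] at h
  simp only [Nat.choose_zero_right] at h
  have h1 : ∑ j ∈ Finset.range m, m.choose (j+1) = 2 ^ m - 1 := by omega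
  have h2 : (((∑ j ∈ Finset.range m, m.choose (j+1)) : Nat) : Int)
      = ((2 ^ m - 1 : Nat) : Int) := by rw [h1]
  rw [Nat.cast_sum] at h2
  rw [h2, Nat.cast_sub (Nat.one_le_two_pow)]
  push_cast
  ring

-- binomial theorem for (1+2)^n, in the shape used below
lemma three_pow_sum (n : Nat) :
    ∑ k ∈ Finset.range (n+1), (2:Int) ^ (n - k) * (n.choose k : Int) = 3 ^ n := by
  have h := add_pow (1 : Int) 2 n
  norm_num at h
  rw [← h]

lemma core_identity (n : Nat) (hn : 2 ≤ n) :
    ∑ i ∈ Finset.range (n - 1), ∑ j ∈ Finset.range (n - (i+1)),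
        (if i = j then 0
         else (n.choose (i+1) : Int) * ((n - (i+1)).choose (j+1) : Int))
      = (3 ^ n - 2 * 2 ^ n + 1 : Int)
        - ∑ k ∈ Finset.range (n / 2),
            (n.choose (k+1) : Int) * ((n - (k+1)).choose (k+1) : Int) := by
  have step1 : ∀ i ∈ Finset.range (n-1),
      (∑ j ∈ Finset.range (n - (i+1)),
        (if i = j then 0
         else (n.choose (i+1) : Int) * ((n - (i+1)).choose (j+1) : Int)))
      = (n.choose (i+1) : Int) * (2 ^ (n-(i+1)) - 1)
        - (if i < n/2 then (n.choose (i+1) : Int) * ((n-(i+1)).choose (i+1) : Int) else 0) := by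
    intro i hi
    have hsplit : ∀ j, (if i = j then 0
          else (n.choose (i+1) : Int) * ((n-(i+1)).choose (j+1) : Int))
        = (n.choose (i+1) : Int) * ((n-(i+1)).choose (j+1) : Int)
          - (if j = i then (n.choose (i+1) : Int) * ((n-(i+1)).choose (j+1) : Int) else 0) := by
      intro j
      by_cases h : i = j
      · subst h; simp
      · rw [if_neg h, if_neg (fun hji => h hji.symm)]; ring
    rw [Finset.sum_congr rfl (fun j _ => hsplit j), Finset.sum_sub_distrib,
      Finset.sum_ite_eq' (Finset.range (n-(i+1))) i, ← Finset.mul_sum, choose_shift_sum]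
    congr 1
    by_cases hc : i < n/2
    · rw [if_pos (Finset.mem_range.mpr (by omega : i < n - (i+1))), if_pos hc]
    · rw [if_neg (by simp only [Finset.mem_range]; omega), if_neg hc]
  rw [Finset.sum_congr rfl step1, Finset.sum_sub_distrib]
  have hS2 : ∑ i ∈ Finset.range (n-1), (n.choose (i+1) : Int) = 2 ^ n - 2 := by
    have h := Finset.sum_range_succ (fun j => (n.choose (j+1) : Int)) (n-1)
    rw [show (n-1)+1 = n by omega] at h
    rw [choose_shift_sum] at h
    simp only [Nat.choose_self, Nat.cast_one] at h
    linarith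
  have hS1 : ∑ i ∈ Finset.range (n-1), (2:Int) ^ (n-(i+1)) * (n.choose (i+1) : Int)
      = 3 ^ n - 2 ^ n - 1 := by
    have h3 := three_pow_sum n
    rw [Finset.sum_range_succ'] at h3
    simp only [Nat.sub_zero, Nat.choose_zero_right, Nat.cast_one, mul_one] at h3
    have h4 : ∑ i ∈ Finset.range n, (2:Int) ^ (n-(i+1)) * (n.choose (i+1) : Int)
        = 3 ^ n - 2 ^ n := by linarith
    have h5 := Finset.sum_range_succ
      (fun i => (2:Int) ^ (n-(i+1)) * (n.choose (i+1) : Int)) (n-1)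
    rw [show (n-1)+1 = n by omega] at h5
    rw [h5] at h4
    simp only [Nat.sub_self, pow_zero, Nat.choose_self, Nat.cast_one, mul_one] at h4
    linarith
  have partB : ∑ i ∈ Finset.range (n-1), (n.choose (i+1) : Int) * (2 ^ (n-(i+1)) - 1)
      = 3 ^ n - 2 * 2 ^ n + 1 := by
    rw [Finset.sum_congr rfl (fun i _ =>
      (by ring : (n.choose (i+1) : Int) * (2 ^ (n-(i+1)) - 1)
        = (2:Int) ^ (n-(i+1)) * (n.choose (i+1) : Int) - (n.choose (i+1) : Int))),
      Finset.sum_sub_distrib, hS1, hS2]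
    ring
  have partC : ∑ i ∈ Finset.range (n-1),
      (if i < n/2 then (n.choose (i+1) : Int) * ((n-(i+1)).choose (i+1) : Int) else 0)
      = ∑ k ∈ Finset.range (n / 2),
          (n.choose (k+1) : Int) * ((n - (k+1)).choose (k+1) : Int) := by
    rw [← Finset.sum_filter]
    apply Finset.sum_congr
    · ext x
      simp only [Finset.mem_filter, Finset.mem_range]
      omega
    · intro x _; rfl
  rw [partB, partC]

-- ===== VERDICT (by name: the statement is the Claim_ definition above) =====
theorem count_subset_pairs_spec : Claim_equal_count_subset_pairs := by
  intro n_vars _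
  unfold Spec_count_subset_pairs
  by_cases h : n_vars ≤ 1
  · simp [count_subset_pairs, count_subset_pairs_alt, PySem.List.pyRange_one_eq_nil h, h]
  · obtain ⟨n, rfl⟩ : ∃ m : Nat, n_vars = (m : Int) := ⟨n_vars.toNat, by omega⟩
    have hn : 2 ≤ n := by omega
    rw [portA_eq_sum n hn, portB_eq_sum n hn, core_identity n hn]
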